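-- pv_equiv track=rewrite | github.com/Kol-UI/ArchivePython | Advanced Algorithms/tp2016Glouton.py | tp2016Glouton
-- ===== SOURCE A (Python) =====
-- def tp2016Glouton(liste,ind,y):
--     if ind==len(liste)-1:
--         return liste[ind][y]
--     else:
--         if liste[ind+1][y]>liste[ind+1][y+1]:
--             return liste[ind][y]+tp2016Glouton(liste,ind+1,y)
--         else:
--             return liste[ind][y]+tp2016Glouton(liste,ind+1,y+1)
-- ===== SOURCE B (Python) =====
-- def tp2016Glouton(liste, ind, y):
--     # Walk over the row lists themselves (no index arithmetic into liste):
--     # slice off the rows from ind, start with the top cell, then for each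
--     # following row move the column greedily and add that row's cell.
--     rows = liste[ind:]
--     total = rows[0][y]
--     for nxt in rows[1:]:
--         if nxt[y] <= nxt[y + 1]:
--             y += 1
--         total += nxt[y]
--     return total
-- ===== Notes on version B (the rewrite author's own statement) =====
-- stated objective: alternative
-- what changed: Replaces the non-tail recursion indexed into the whole triangle by a single slice liste[ind:] followed by a for-loop over the row lists themselves with a running total, eliminating all index arithmetic into liste and the call stack.
-- outside the precondition, e.g. on tp2016Glouton([[7, 0], [-2, 0]], -2, -2): A returns 14, B returns 7
import Mathlib
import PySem

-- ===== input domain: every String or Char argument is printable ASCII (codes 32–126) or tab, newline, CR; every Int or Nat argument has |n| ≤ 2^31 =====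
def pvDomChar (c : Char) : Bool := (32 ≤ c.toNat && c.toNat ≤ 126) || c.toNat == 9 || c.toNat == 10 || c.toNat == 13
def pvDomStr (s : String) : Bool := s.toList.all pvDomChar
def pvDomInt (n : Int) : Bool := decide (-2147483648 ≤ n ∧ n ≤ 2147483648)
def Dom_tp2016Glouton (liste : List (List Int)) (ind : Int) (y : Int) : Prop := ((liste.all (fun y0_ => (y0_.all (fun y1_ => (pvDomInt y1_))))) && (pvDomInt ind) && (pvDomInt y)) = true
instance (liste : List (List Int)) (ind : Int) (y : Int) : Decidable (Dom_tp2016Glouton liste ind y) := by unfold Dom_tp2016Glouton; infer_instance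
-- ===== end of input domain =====

-- B slices the triangle once and iterates over the row lists themselves (no index
-- arithmetic into liste), tracking only the column; return value only, no mutation.

-- ===== PORT A =====
-- liste[i][j] with Python indexing (the default 0 is only reachable outside Pre_)
def pvCell (liste : List (List Int)) (i j : Int) : Int :=
  PySem.List.pyGetD (PySem.List.pyGetD liste i []) j 0

-- fuel-indexed transliteration of A's recursion; fuel (len - ind) + 1 is enough whenever
-- the Python recursion terminates (including Python's negative-ind wraparound walk)
def tp2016GloutonAux (liste : List (List Int)) : Nat → Int → Int → Int
  | 0, _, _ => 0
  | fuel + 1, ind, y =>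
    if ind = (liste.length : Int) - 1 then
      pvCell liste ind y
    else
      if pvCell liste (ind + 1) y > pvCell liste (ind + 1) (y + 1) then
        pvCell liste ind y + tp2016GloutonAux liste fuel (ind + 1) y
      else
        pvCell liste ind y + tp2016GloutonAux liste fuel (ind + 1) (y + 1)

def tp2016Glouton (liste : List (List Int)) (ind : Int) (y : Int) : Int :=
  tp2016GloutonAux liste (((liste.length : Int) - ind).toNat + 1) ind y

-- ===== PORT B =====
-- the 'for nxt in rows[1:]' loop of Source B: structural recursion over the remaining rows
def tp2016GloutonRows : List (List Int) → Int → Int → Int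
  | [], _, total => total
  | nxt :: rest, y, total =>
    let y' := if PySem.List.pyGetD nxt y 0 ≤ PySem.List.pyGetD nxt (y + 1) 0 then y + 1 else y
    tp2016GloutonRows rest y' (total + PySem.List.pyGetD nxt y' 0)

def tp2016Glouton_alt (liste : List (List Int)) (ind : Int) (y : Int) : Int :=
  let rows := PySem.List.slice liste (some ind) none
  tp2016GloutonRows (PySem.List.slice rows (some 1) none) y
    (PySem.List.pyGetD (PySem.List.pyGetD rows 0 []) y 0)

-- ===== PRECONDITION & SPEC =====
-- Pre_ excludes the inputs on which A raises IndexError, and (a sufficient closed form, since the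
-- visited cells depend on the data) also some returning inputs on which every program reads a cell
-- only reachable through Python's accidental negative-index wraparound or a data-dependent path;
-- A and B agree on those too, but the bound below over-approximates the visited columns.
def Pre_tp2016Glouton (liste : List (List Int)) (ind : Int) (y : Int) : Prop :=
  0 ≤ ind ∧ ind < (liste.length : Int) ∧
  ∀ k < liste.length, ind.toNat ≤ k →
    ∀ j < k - ind.toNat + 1, PySem.Raise.InRange (liste.getD k []).length (y + (j : Int))

instance (liste : List (List Int)) (ind : Int) (y : Int) : Decidable (Pre_tp2016Glouton liste ind y) := by
  unfold Pre_tp2016Glouton; infer_instance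

def pvWitness_tp2016Glouton : List (List Int) × Int × Int := ([[1], [2, 3]], 0, 0)

def Spec_tp2016Glouton (liste : List (List Int)) (ind : Int) (y : Int) (out : Int) : Prop := out = tp2016Glouton_alt liste ind y
instance (liste : List (List Int)) (ind : Int) (y : Int) (out : Int) : Decidable (Spec_tp2016Glouton liste ind y out) := by unfold Spec_tp2016Glouton; infer_instance

-- ===== CLAIM (what is proved, stated in full; the proofs are below) =====
def Claim_equal_tp2016Glouton : Prop := ∀ (liste : List (List Int)) (ind : Int) (y : Int), Dom_tp2016Glouton liste ind y → Pre_tp2016Glouton liste ind y → Spec_tp2016Glouton liste ind y (tp2016Glouton liste ind y)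

-- ===== LEMMAS AND PROOFS =====

-- B's loop peels its accumulator off as a sum
theorem tp2016GloutonRows_acc (rows : List (List Int)) :
    ∀ (y total : Int), tp2016GloutonRows rows y total = total + tp2016GloutonRows rows y 0 := by
  induction rows with
  | nil => intro y total; simp [tp2016GloutonRows]
  | cons nxt rest ih =>
    intro y total
    simp only [tp2016GloutonRows]
    rw [ih _ (total + _), ih _ (0 + _)]
    ring

-- in-range pvCell reads the actual row (as a getD, which rewrites smoothly)
theorem pvCell_eq (liste : List (List Int)) (i j : Int) (h0 : 0 ≤ i) :
    pvCell liste i j = PySem.List.pyGetD (liste.getD i.toNat []) j 0 := by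
  unfold pvCell
  have hi : i = ((i.toNat : Nat) : Int) := by omega
  conv_lhs => rw [hi, PySem.List.pyGetD_natCast]

-- A's fueled recursion at (ind, y) is the top cell plus B's walk over the rows below
theorem mainLemma (liste : List (List Int)) :
    ∀ (fuel : Nat) (ind y : Int), 0 ≤ ind → ind.toNat < liste.length →
      liste.length - ind.toNat ≤ fuel →
      tp2016GloutonAux liste fuel ind y
        = pvCell liste ind y + tp2016GloutonRows (liste.drop (ind.toNat + 1)) y 0 := by
  intro fuel
  induction fuel with
  | zero => intro ind y h0 hlt hle; omega
  | succ f ih =>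
    intro ind y h0 hlt hle
    by_cases hterm : ind = (liste.length : Int) - 1
    · have hdrop : liste.drop (ind.toNat + 1) = [] := by
        apply List.drop_eq_nil_of_le; omega
      simp only [tp2016GloutonAux]
      rw [if_pos hterm, hdrop]
      simp [tp2016GloutonRows]
    · have h1 : (0 : Int) ≤ ind + 1 := by omega
      have ht1 : (ind + 1).toNat = ind.toNat + 1 := by omega
      have h3 : (ind + 1).toNat < liste.length := by omega
      have h4 : liste.length - (ind + 1).toNat ≤ f := by omega
      have hdrop : liste.drop (ind.toNat + 1)
          = liste.getD (ind.toNat + 1) [] :: liste.drop (ind.toNat + 1 + 1) := by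
        rw [List.drop_eq_getElem_cons (show ind.toNat + 1 < liste.length by omega),
            List.getD_eq_getElem liste [] (by omega)]
      have hcell : ∀ j : Int, pvCell liste (ind + 1) j
          = PySem.List.pyGetD (liste.getD (ind.toNat + 1) []) j 0 := by
        intro j; rw [pvCell_eq liste (ind + 1) j h1, ht1]
      simp only [tp2016GloutonAux]
      rw [if_neg hterm, hdrop]
      simp only [tp2016GloutonRows]
      by_cases hc : pvCell liste (ind + 1) y > pvCell liste (ind + 1) (y + 1)
      · rw [if_pos hc, ih (ind + 1) y h1 h3 h4, ht1]
        have hif : (if PySem.List.pyGetD (liste.getD (ind.toNat + 1) []) y 0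
              ≤ PySem.List.pyGetD (liste.getD (ind.toNat + 1) []) (y + 1) 0 then y + 1 else y) = y := by
          rw [if_neg]; rw [← hcell y, ← hcell (y + 1)]; omega
        rw [hif, hcell y, zero_add,
            tp2016GloutonRows_acc (liste.drop (ind.toNat + 1 + 1)) y
              (PySem.List.pyGetD (liste.getD (ind.toNat + 1) []) y 0)]
      · rw [if_neg hc, ih (ind + 1) (y + 1) h1 h3 h4, ht1]
        have hif : (if PySem.List.pyGetD (liste.getD (ind.toNat + 1) []) y 0
              ≤ PySem.List.pyGetD (liste.getD (ind.toNat + 1) []) (y + 1) 0 then y + 1 else y) = y + 1 := by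
          rw [if_pos]; rw [← hcell y, ← hcell (y + 1)]; omega
        rw [hif, hcell (y + 1), zero_add,
            tp2016GloutonRows_acc (liste.drop (ind.toNat + 1 + 1)) (y + 1)
              (PySem.List.pyGetD (liste.getD (ind.toNat + 1) []) (y + 1) 0)]

-- the head of the sliced rows is row ind
theorem head_drop_getD (liste : List (List Int)) (n : Nat) :
    (liste.drop n).getD 0 ([] : List Int) = liste.getD n [] := by
  rw [List.getD_eq_getElem?_getD, List.getD_eq_getElem?_getD, List.getElem?_drop, Nat.add_zero]

-- ===== VERDICT (by name: the statement is the Claim_ definition above) =====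
theorem tp2016Glouton_spec : Claim_equal_tp2016Glouton := by
  intro liste ind y _ hpre
  obtain ⟨h0, hlt, -⟩ := hpre
  have hlt' : ind.toNat < liste.length := by omega
  unfold Spec_tp2016Glouton tp2016Glouton
  simp only [tp2016Glouton_alt]
  rw [mainLemma liste (((liste.length : Int) - ind).toNat + 1) ind y h0 hlt' (by omega),
      PySem.List.slice_from liste h0, PySem.List.slice_from_one,
      List.tail_drop, PySem.List.pyGetD_zero, head_drop_getD,
      pvCell_eq liste ind y h0,
      tp2016GloutonRows_acc (liste.drop (ind.toNat + 1)) y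
        (PySem.List.pyGetD (liste.getD ind.toNat []) y 0)]
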